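-- pv_equiv track=rewrite | github.com/SIDED00R/Code_training | 프로그래머스/2/172927. 광물 캐기/광물 캐기.py | solution
-- ===== SOURCE A (Python) =====
-- def solution(picks, minerals):
--     arr = []
--     answer = 0
--     for i in range(0, min(len(minerals), sum(picks) * 5), 5):
--         case = minerals[i:i + 5]
--         arr.append([case.count("diamond"), case.count("iron"), case.count("stone")])
--     arr = sorted(arr, key = lambda x: [x[0], x[1], x[2]])
--     while arr != []:
--         d, i, s = arr.pop()
--         if picks[0] != 0:
--             picks[0] -= 1
--             answer += d + i + s
--         elif picks[1] != 0:
--             picks[1] -= 1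
--             answer += 5 * d + i + s
--         elif picks[2] != 0:
--             picks[2] -= 1
--             answer += 25 * d + 5 * i + s
--     return answer
-- ===== SOURCE B (Python) =====
-- def solution(picks, minerals):
--     limit = min(len(minerals), sum(picks) * 5)
--     buckets = [0] * 216
--     for i in range(0, limit, 5):
--         chunk = minerals[i:i + 5]
--         buckets[36 * chunk.count("diamond") + 6 * chunk.count("iron") + chunk.count("stone")] += 1
--     answer = 0
--     for key in range(215, -1, -1):
--         c = buckets[key]
--         if not c:
--             continue
--         d, i, s = key // 36, key % 36 // 6, key % 6
--         t = min(picks[0], c)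
--         picks[0] -= t
--         answer += t * (d + i + s)
--         c -= t
--         if c:
--             t = min(picks[1], c)
--             picks[1] -= t
--             answer += t * (5 * d + i + s)
--             c -= t
--             if c:
--                 t = min(picks[2], c)
--                 picks[2] -= t
--                 answer += t * (25 * d + 5 * i + s)
--     return answer
-- ===== Notes on version B (the rewrite author's own statement) =====
-- stated objective: alternative
-- what changed: B replaces A's build-list + comparison sort + pop-one-chunk-per-iteration loop by a 216-bucket count over the bounded (diamond,iron,stone) chunk codes, walking the buckets in descending code order and assigning each bucket's chunks to the picks in bulk with min(); Pre_ excludes inputs with a negative pick count among the entries the greedy loop reads (negative counts are outside the problem's domain; A's '!= 0' test accidentally treats a negative count as unlimited picks, B's min() does not).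
-- outside the precondition, e.g. on solution([-1, 2, 0], ['diamond']): A returns 1, B returns 9
import Mathlib
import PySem

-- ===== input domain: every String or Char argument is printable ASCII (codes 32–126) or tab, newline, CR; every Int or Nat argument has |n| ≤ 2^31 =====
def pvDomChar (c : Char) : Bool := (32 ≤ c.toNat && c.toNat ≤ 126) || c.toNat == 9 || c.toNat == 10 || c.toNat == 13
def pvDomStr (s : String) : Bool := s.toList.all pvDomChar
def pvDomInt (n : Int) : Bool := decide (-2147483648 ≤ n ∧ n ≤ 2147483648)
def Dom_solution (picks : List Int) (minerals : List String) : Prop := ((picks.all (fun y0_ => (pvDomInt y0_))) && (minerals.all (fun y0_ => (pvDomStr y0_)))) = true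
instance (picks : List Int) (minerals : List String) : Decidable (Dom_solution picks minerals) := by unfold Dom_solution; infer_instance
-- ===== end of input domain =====

-- B replaces A's comparison sort of the chunk triples by a bucket count over the 216
-- possible (diamond, iron, stone) codes, emitting chunks in descending code order and
-- assigning each bucket's chunks to the picks in bulk with min.
-- Both programs mutate the Python list `picks` in place; the theorems below are about
-- the return value only.

-- ===== PORT A =====
-- A's while/pop() loop consumes the sorted list from its END; it is ported as a foldl
-- over the reversed sorted list with the same state (picks, answer).
-- picks[j] is read only at indices the loop reaches, so the `getD 0` defaults are
-- never the value used on inputs satisfying Pre_solution.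
def solution (picks : List Int) (minerals : List String) : Int :=
  let arr : List (Int × Int × Int) :=
    (PySem.List.pyRange 0 (min (minerals.length : Int) (picks.sum * 5)) 5).foldl
      (fun acc i =>
        let case := PySem.List.slice minerals (some i) (some (i + 5))
        acc ++ [(((PySem.List.count case "diamond" : Nat) : Int),
                 ((PySem.List.count case "iron" : Nat) : Int),
                 ((PySem.List.count case "stone" : Nat) : Int))]) []
  let arr := PySem.List.sorted arr (fun x => [x.1, x.2.1, x.2.2]) false
  let res :=
    arr.reverse.foldl
      (fun (st : List Int × Int) (t : Int × Int × Int) =>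
        let picks := st.1
        let answer := st.2
        let d := t.1; let i := t.2.1; let s := t.2.2
        if picks.getD 0 0 ≠ 0 then (picks.set 0 (picks.getD 0 0 - 1), answer + (d + i + s))
        else if picks.getD 1 0 ≠ 0 then (picks.set 1 (picks.getD 1 0 - 1), answer + (5 * d + i + s))
        else if picks.getD 2 0 ≠ 0 then (picks.set 2 (picks.getD 2 0 - 1), answer + (25 * d + 5 * i + s))
        else (picks, answer))
      (picks, 0)
  res.2

-- ===== PORT B =====
-- buckets[key] += 1 : the key 36*d+6*n+s is provably nonnegative, so .toNat is exact here.
-- 'if not c: continue' and the nested 'if c:' blocks become nested if-expressions.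
def solution_alt (picks : List Int) (minerals : List String) : Int :=
  let limit := min (minerals.length : Int) (picks.sum * 5)
  let buckets : List Int :=
    (PySem.List.pyRange 0 limit 5).foldl
      (fun b i =>
        let chunk := PySem.List.slice minerals (some i) (some (i + 5))
        let key := 36 * ((PySem.List.count chunk "diamond" : Nat) : Int)
                 + 6 * ((PySem.List.count chunk "iron" : Nat) : Int)
                 + ((PySem.List.count chunk "stone" : Nat) : Int)
        b.set key.toNat (PySem.List.pyGetD b key 0 + 1))
      (List.replicate 216 (0:Int))
  let res :=
    (PySem.List.pyRange 215 (-1) (-1)).foldl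
      (fun (st : List Int × Int) (key : Int) =>
        let c := PySem.List.pyGetD buckets key 0
        if c = 0 then st
        else
          let d := PySem.Int.floordiv key 36
          let n := PySem.Int.floordiv (PySem.Int.mod key 36) 6
          let s := PySem.Int.mod key 6
          let pk0 := st.1
          let answer := st.2
          let t0 := min (pk0.getD 0 0) c
          let pk1 := pk0.set 0 (pk0.getD 0 0 - t0)
          let a1 := answer + t0 * (d + n + s)
          let c1 := c - t0
          if c1 ≠ 0 then
            let t1 := min (pk1.getD 1 0) c1
            let pk2 := pk1.set 1 (pk1.getD 1 0 - t1)
            let a2 := a1 + t1 * (5 * d + n + s)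
            let c2 := c1 - t1
            if c2 ≠ 0 then
              let t2 := min (pk2.getD 2 0) c2
              let pk3 := pk2.set 2 (pk2.getD 2 0 - t2)
              let a3 := a2 + t2 * (25 * d + 5 * n + s)
              (pk3, a3)
            else (pk2, a2)
          else (pk1, a1))
      (picks, 0)
  res.2

-- ===== PRECONDITION & SPEC =====
-- Pre_solution excludes inputs with a negative pick count among the entries the greedy
-- loop actually reads: negative counts are outside the problem's domain, and A's
-- `picks[j] != 0` test accidentally treats a negative count as unlimited picks while
-- B's min() does not.  (k is the number of 5-mineral chunks A processes; picks[0] is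
-- read only if k > 0, picks[1] only if the first k ≤ p0 bound fails, picks[2] only if
-- k ≤ p0 + p1 fails; the length conjuncts rule out IndexError on those reads.)
def Pre_solution (picks : List Int) (minerals : List String) : Prop :=
  let m := min (minerals.length : Int) (picks.sum * 5)
  let k := if m ≤ 0 then 0 else PySem.Int.floordiv (m + 4) 5
  let p0 := picks.getD 0 0
  let p1 := picks.getD 1 0
  let p2 := picks.getD 2 0
  k ≤ 0 ∨ (1 ≤ picks.length ∧ 0 ≤ p0 ∧
    (k ≤ p0 ∨ (2 ≤ picks.length ∧ 0 ≤ p1 ∧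
      (k ≤ p0 + p1 ∨ (3 ≤ picks.length ∧ 0 ≤ p2)))))
instance (picks : List Int) (minerals : List String) : Decidable (Pre_solution picks minerals) := by unfold Pre_solution; infer_instance

def pvWitness_solution : List Int × List String := ([1, 1, 1], ["diamond", "stone", "iron", "stone", "stone", "iron", "diamond"])

def Spec_solution (picks : List Int) (minerals : List String) (out : Int) : Prop := out = solution_alt picks minerals
instance (picks : List Int) (minerals : List String) (out : Int) : Decidable (Spec_solution picks minerals out) := by unfold Spec_solution; infer_instance

-- ===== CLAIM (what is proved, stated in full; the proofs are below) =====
def Claim_equal_solution : Prop := ∀ (picks : List Int) (minerals : List String), Dom_solution picks minerals → Pre_solution picks minerals → Spec_solution picks minerals (solution picks minerals)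


-- ===== LEMMAS AND PROOFS =====

-- encoding of a chunk triple into its bucket index, and its inverse on bounded triples
def pvEnc (t : Int × Int × Int) : Int := 36 * t.1 + 6 * t.2.1 + t.2.2
def pvDec (k : Int) : Int × Int × Int :=
  (PySem.Int.floordiv k 36, PySem.Int.floordiv (PySem.Int.mod k 36) 6, PySem.Int.mod k 6)
def pvBnd (t : Int × Int × Int) : Prop :=
  0 ≤ t.1 ∧ t.1 ≤ 5 ∧ 0 ≤ t.2.1 ∧ t.2.1 ≤ 5 ∧ 0 ≤ t.2.2 ∧ t.2.2 ≤ 5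
def pvKey (t : Int × Int × Int) : List Int := [t.1, t.2.1, t.2.2]
def pvChunk (minerals : List String) (i : Int) : Int × Int × Int :=
  let case := PySem.List.slice minerals (some i) (some (i + 5))
  (((PySem.List.count case "diamond" : Nat) : Int),
   ((PySem.List.count case "iron" : Nat) : Int),
   ((PySem.List.count case "stone" : Nat) : Int))
def pvChunks (picks : List Int) (minerals : List String) : List (Int × Int × Int) :=
  (PySem.List.pyRange 0 (min (minerals.length : Int) (picks.sum * 5)) 5).map (pvChunk minerals)
def pvStepA (st : List Int × Int) (t : Int × Int × Int) : List Int × Int :=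
  let picks := st.1
  let answer := st.2
  let d := t.1; let i := t.2.1; let s := t.2.2
  if picks.getD 0 0 ≠ 0 then (picks.set 0 (picks.getD 0 0 - 1), answer + (d + i + s))
  else if picks.getD 1 0 ≠ 0 then (picks.set 1 (picks.getD 1 0 - 1), answer + (5 * d + i + s))
  else if picks.getD 2 0 ≠ 0 then (picks.set 2 (picks.getD 2 0 - 1), answer + (25 * d + 5 * i + s))
  else (picks, answer)
def pvCnt (picks : List Int) (minerals : List String) (k : Int) : Nat :=
  (pvChunks picks minerals).countP (fun t => pvEnc t == k)
def pvKdesc : List Int := PySem.List.pyRange 215 (-1) (-1)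
def pvTripSeq (picks : List Int) (minerals : List String) : List (Int × Int × Int) :=
  pvKdesc.flatMap (fun k => List.replicate (pvCnt picks minerals k) (pvDec k))

-- arithmetic facts about the encoding
lemma pvDec_enc (t : Int × Int × Int) (h : pvBnd t) : pvDec (pvEnc t) = t := by
  obtain ⟨h1,h2,h3,h4,h5,h6⟩ := h
  simp only [pvDec, pvEnc]
  rw [PySem.Int.floordiv_eq_ediv_of_pos (by omega : (0:Int) < 36),
      PySem.Int.mod_eq_emod_of_pos (by omega : (0:Int) < 36),
      PySem.Int.floordiv_eq_ediv_of_pos (by omega : (0:Int) < 6),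
      PySem.Int.mod_eq_emod_of_pos (by omega : (0:Int) < 6)]
  refine Prod.ext ?_ (Prod.ext ?_ ?_) <;> simp <;> omega
lemma pvEnc_bounds (t : Int × Int × Int) (h : pvBnd t) : 0 ≤ pvEnc t ∧ pvEnc t < 216 := by
  obtain ⟨h1,h2,h3,h4,h5,h6⟩ := h
  simp only [pvEnc]
  omega
lemma pvEnc_dec (k : Int) (_h0 : 0 ≤ k) (_h1 : k < 216) : pvEnc (pvDec k) = k := by
  simp only [pvEnc, pvDec]
  rw [PySem.Int.floordiv_eq_ediv_of_pos (by omega : (0:Int) < 36),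
      PySem.Int.mod_eq_emod_of_pos (by omega : (0:Int) < 36),
      PySem.Int.floordiv_eq_ediv_of_pos (by omega : (0:Int) < 6),
      PySem.Int.mod_eq_emod_of_pos (by omega : (0:Int) < 6)]
  omega
lemma pvBnd_dec (k : Int) (h0 : 0 ≤ k) (h1 : k < 216) : pvBnd (pvDec k) := by
  simp only [pvBnd, pvDec]
  rw [PySem.Int.floordiv_eq_ediv_of_pos (by omega : (0:Int) < 36),
      PySem.Int.mod_eq_emod_of_pos (by omega : (0:Int) < 36),
      PySem.Int.floordiv_eq_ediv_of_pos (by omega : (0:Int) < 6),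
      PySem.Int.mod_eq_emod_of_pos (by omega : (0:Int) < 6)]
  refine ⟨?_,?_,?_,?_,?_,?_⟩ <;> omega
lemma pvEnc_inj (a b : Int × Int × Int) (ha : pvBnd a) (hb : pvBnd b) (h : pvEnc a = pvEnc b) : a = b := by
  have := pvDec_enc a ha
  have := pvDec_enc b hb
  rw [← pvDec_enc a ha, ← pvDec_enc b hb, h]
lemma pvKey_inj : Function.Injective pvKey := by
  intro a b h
  obtain ⟨a1, a2, a3⟩ := a
  obtain ⟨b1, b2, b3⟩ := b
  simpa [pvKey] using h
lemma pvKey_le (a b : Int × Int × Int) (ha : pvBnd a) (hb : pvBnd b) (h : pvEnc a ≤ pvEnc b) :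
    pvKey a ≤ pvKey b := by
  rcases eq_or_lt_of_le h with heq | hlt
  · exact le_of_eq (congrArg pvKey (pvEnc_inj a b ha hb heq))
  · apply le_of_lt
    obtain ⟨a1, a2, a3⟩ := a
    obtain ⟨b1, b2, b3⟩ := b
    obtain ⟨ha1, ha2, ha3, ha4, ha5, ha6⟩ := ha
    obtain ⟨hb1, hb2, hb3, hb4, hb5, hb6⟩ := hb
    simp only [pvEnc] at hlt
    show (([a1, a2, a3] : List Int) < [b1, b2, b3])
    simp only [List.cons_lt_cons_iff, lt_self_iff_false, and_false, or_false]
    dsimp only at ha1 ha2 ha3 ha4 ha5 ha6 hb1 hb2 hb3 hb4 hb5 hb6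
    omega

-- every chunk triple is a triple of counts of a ≤5-element slice
lemma pvBnd_chunk (minerals : List String) (i : Int) (hi : 0 ≤ i) : pvBnd (pvChunk minerals i) := by
  have hlen : (PySem.List.slice minerals (some i) (some (i + 5))).length ≤ 5 := by
    rw [PySem.List.length_slice]
    simp only [PySem.List.clampIdx]
    split_ifs <;> omega
  have hcount : ∀ v : String, (PySem.List.count (PySem.List.slice minerals (some i) (some (i + 5))) v : Nat) ≤ 5 := by
    intro v
    rw [PySem.List.count_eq]
    exact le_trans List.count_le_length hlen
  simp only [pvChunk, pvBnd]
  refine ⟨by positivity, ?_, by positivity, ?_, by positivity, ?_⟩ <;> exact_mod_cast hcount _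
lemma pvBnd_chunks (picks : List Int) (minerals : List String) :
    ∀ t ∈ pvChunks picks minerals, pvBnd t := by
  intro t ht
  simp only [pvChunks, List.mem_map] at ht
  obtain ⟨i, hi, rfl⟩ := ht
  have := (PySem.List.mem_pyRange_iff_of_pos (by omega : (0:Int) < 5) i).mp hi
  exact pvBnd_chunk minerals i this.1

-- membership facts about the descending key range
lemma pvKdesc_mem (k : Int) : k ∈ pvKdesc ↔ 0 ≤ k ∧ k < 216 := by
  simp only [pvKdesc, PySem.List.mem_pyRange_neg_one]
  omega
lemma pvKdesc_nodup : pvKdesc.Nodup := by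
  rw [pvKdesc, PySem.List.pyRange_neg_one_eq_reverse]
  exact List.nodup_reverse.mpr (PySem.List.nodup_pyRange_one _ _)
lemma pvKdesc_pairwise : pvKdesc.Pairwise (fun a b => b < a) := by
  rw [pvKdesc, PySem.List.pyRange_neg_one_eq_reverse]
  exact List.pairwise_reverse.mpr (PySem.List.pairwise_lt_pyRange_one _ _)

-- the bucket-building fold counts chunks by code
lemma pvBuckets_spec (l : List (Int × Int × Int)) (hb : ∀ t ∈ l, pvBnd t)
    (b0 : List Int) (hlen : b0.length = 216) (k : Int) (h0 : 0 ≤ k) (h1 : k < 216) :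
    PySem.List.pyGetD
      (l.foldl (fun b t => b.set (pvEnc t).toNat (PySem.List.pyGetD b (pvEnc t) 0 + 1)) b0) k 0
      = PySem.List.pyGetD b0 k 0 + (l.countP (fun t => pvEnc t == k) : Int) := by
  induction l generalizing b0 with
  | nil => simp
  | cons t l ih =>
    have hbt := hb t (by simp)
    have henc := pvEnc_bounds t hbt
    have hset : (b0.set (pvEnc t).toNat (PySem.List.pyGetD b0 (pvEnc t) 0 + 1)).length = 216 := by
      simp [hlen]
    rw [List.foldl_cons, ih (fun u hu => hb u (by simp [hu])) _ hset, List.countP_cons]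
    have hg : ∀ (v : Int), PySem.List.pyGetD (b0.set (pvEnc t).toNat v) k 0
        = if (pvEnc t) = k then v else PySem.List.pyGetD b0 k 0 := by
      intro v
      rw [PySem.List.pyGetD_eq_getElem _ _ h0 (by rw [List.length_set, hlen]; exact_mod_cast h1),
          PySem.List.pyGetD_eq_getElem _ _ h0 (by rw [hlen]; exact_mod_cast h1),
          List.getElem_set]
      have : (pvEnc t).toNat = k.toNat ↔ pvEnc t = k := by omega
      split_ifs with h' h'' h'' <;> first | rfl | (exfalso; omega)
    rw [hg]
    by_cases hek : pvEnc t = k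
    · simp [hek]
      ring
    · have : (pvEnc t == k) = false := by simp [hek]
      simp [hek, this]

-- a flatMap fold is the fold of the folds of its pieces
lemma pvFoldl_flatMap {α β : Type} (g : Int → List α) (f : β → α → β) (K : List Int) (st : β) :
    (K.flatMap g).foldl f st = K.foldl (fun s k => (g k).foldl f s) st := by
  induction K generalizing st with
  | nil => rfl
  | cons k K ih => simp only [List.flatMap_cons, List.foldl_append, List.foldl_cons]; exact ih _

-- filter by a disjunction splits as a permutation
lemma pvFilter_or_perm {α : Type} (l : List α) (p q : α → Bool) (hdisj : ∀ x ∈ l, ¬(p x = true ∧ q x = true)) :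
    (l.filter (fun x => p x || q x)).Perm (l.filter p ++ l.filter q) := by
  induction l with
  | nil => simp
  | cons x l ih =>
    have ih' := ih (fun y hy => hdisj y (by simp [hy]))
    by_cases hp : p x = true
    · have hq : q x = false := by
        rcases Bool.eq_false_or_eq_true (q x) with h | h
        · exact absurd ⟨hp, h⟩ (hdisj x (by simp))
        · exact h
      simpa [hp, hq] using ih'.cons x
    · have hp' : p x = false := by simpa using hp
      by_cases hq : q x = true
      · simp only [List.filter_cons, hp', hq, Bool.false_or, if_true]
        exact (ih'.cons x).trans List.perm_middle.symm
      · have hq' : q x = false := by simpa using hq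
        simpa [hp', hq'] using ih'

-- the flattened replicate sequence is a permutation of the chunk list
lemma pvFlat_perm (picks : List Int) (minerals : List String) (K : List Int) (hnd : K.Nodup)
    (hK : ∀ k ∈ K, 0 ≤ k ∧ k < 216) :
    (K.flatMap (fun k => List.replicate (pvCnt picks minerals k) (pvDec k))).Perm
      ((pvChunks picks minerals).filter (fun t => decide (pvEnc t ∈ K))) := by
  induction K with
  | nil => simp
  | cons k K ih =>
    rw [List.nodup_cons] at hnd
    have hkb := hK k (by simp)
    have ihp := ih hnd.2 (fun k' hk' => hK k' (by simp [hk']))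
    have hrep : (pvChunks picks minerals).filter (fun t => pvEnc t == k)
        = List.replicate (pvCnt picks minerals k) (pvDec k) := by
      rw [List.eq_replicate_iff]
      constructor
      · rw [pvCnt, ← List.countP_eq_length_filter]
      · intro b hbmem
        rw [List.mem_filter] at hbmem
        have hbnd := pvBnd_chunks picks minerals b hbmem.1
        have : pvEnc b = k := by simpa using hbmem.2
        rw [← this, pvDec_enc b hbnd]
    have hsplit : ((pvChunks picks minerals).filter (fun t => decide (pvEnc t ∈ k :: K))).Perm
        ((pvChunks picks minerals).filter (fun t => pvEnc t == k)
          ++ (pvChunks picks minerals).filter (fun t => decide (pvEnc t ∈ K))) := by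
      have heq : ∀ t, (decide (pvEnc t ∈ k :: K)) = ((pvEnc t == k) || decide (pvEnc t ∈ K)) := by
        intro t
        by_cases hek : pvEnc t = k <;> simp [hek, List.mem_cons]
      rw [List.filter_congr (fun t _ => heq t)]
      apply pvFilter_or_perm
      intro t _ ⟨h1, h2⟩
      exact hnd.1 (by rw [← (by simpa using h1 : pvEnc t = k)]; simpa using h2)
    refine List.Perm.trans ?_ hsplit.symm
    rw [List.flatMap_cons, hrep]
    exact List.Perm.append (List.Perm.refl _) ihp
lemma pvTripSeq_perm (picks : List Int) (minerals : List String) :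
    (pvTripSeq picks minerals).Perm (pvChunks picks minerals) := by
  have h := pvFlat_perm picks minerals pvKdesc pvKdesc_nodup (fun k hk => (pvKdesc_mem k).mp hk)
  rw [pvTripSeq]
  refine h.trans ?_
  rw [List.filter_eq_self.mpr]
  intro t ht
  have hb := pvBnd_chunks picks minerals t ht
  have := pvEnc_bounds t hb
  simpa [pvKdesc_mem] using this
lemma pvTripSeq_pairwise (picks : List Int) (minerals : List String) :
    (pvTripSeq picks minerals).Pairwise (fun a b => pvKey b ≤ pvKey a) := by
  rw [pvTripSeq]
  have hgen : ∀ (K : List Int), K.Pairwise (fun a b => b < a) → (∀ k ∈ K, 0 ≤ k ∧ k < 216) →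
      (K.flatMap (fun k => List.replicate (pvCnt picks minerals k) (pvDec k))).Pairwise
        (fun a b => pvKey b ≤ pvKey a) := by
    intro K
    induction K with
    | nil => intro _ _; simp
    | cons k K ih =>
      intro hpw hK
      have hkb := hK k (by simp)
      rw [List.flatMap_cons, List.pairwise_append]
      refine ⟨?_, ih hpw.tail (fun k' hk' => hK k' (by simp [hk'])), ?_⟩
      · exact List.pairwise_replicate.mpr (Or.inr le_rfl)
      · intro a ha b hb
        rw [List.eq_of_mem_replicate ha]
        rw [List.mem_flatMap] at hb
        obtain ⟨k', hk', hbrep⟩ := hb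
        rw [List.eq_of_mem_replicate hbrep]
        have hk'b := hK k' (by simp [hk'])
        have hlt : k' < k := List.rel_of_pairwise_cons hpw hk'
        apply pvKey_le _ _ (pvBnd_dec k' hk'b.1 hk'b.2) (pvBnd_dec k hkb.1 hkb.2)
        rw [pvEnc_dec k' hk'b.1 hk'b.2, pvEnc_dec k hkb.1 hkb.2]
        omega
  exact hgen pvKdesc pvKdesc_pairwise (fun k hk => (pvKdesc_mem k).mp hk)

-- the sorted chunk list is exactly the reversed replicate sequence
lemma pvSorted_eq (picks : List Int) (minerals : List String) :
    PySem.List.sorted (pvChunks picks minerals) pvKey false = (pvTripSeq picks minerals).reverse := by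
  apply PySem.List.eq_of_perm_of_pairwise_le_of_injective pvKey pvKey_inj
  · exact (PySem.List.sorted_perm _ _ _).trans
      ((pvTripSeq_perm picks minerals).symm.trans (pvTripSeq picks minerals).reverse_perm.symm)
  · have hinst : (fun (a b : List ℤ) => a.decidableLT b) = (LinearOrder.toDecidableLT : DecidableLT (List ℤ)) := by
      funext a b; exact Subsingleton.elim _ _
    rw [show (@PySem.List.sorted (ℤ × ℤ × ℤ) (List ℤ) List.instLT (fun a b => a.decidableLT b)
          (pvChunks picks minerals) pvKey false)
        = (@PySem.List.sorted (ℤ × ℤ × ℤ) (List ℤ) List.instLinearOrder.toLT LinearOrder.toDecidableLT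
          (pvChunks picks minerals) pvKey false) from by rw [hinst]]
    exact PySem.List.sorted_pairwise _ _
  · exact List.pairwise_reverse.mpr (pvTripSeq_pairwise picks minerals)

-- A's port, rewritten through the named pieces
lemma pvSolutionA_eq (picks : List Int) (minerals : List String) :
    solution picks minerals
      = (((PySem.List.sorted (pvChunks picks minerals) pvKey false).reverse).foldl pvStepA (picks, 0)).2 := by
  have h1 : (PySem.List.pyRange 0 (min (minerals.length : Int) (picks.sum * 5)) 5).foldl
      (fun acc i => acc ++ [pvChunk minerals i]) ([] : List (Int × Int × Int))
      = pvChunks picks minerals := by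
    rw [pvChunks]
    simpa using PySem.List.foldl_append_singleton_eq_map (pvChunk minerals)
      (PySem.List.pyRange 0 (min (minerals.length : Int) (picks.sum * 5)) 5) []
  show (((PySem.List.sorted
      ((PySem.List.pyRange 0 (min (minerals.length : Int) (picks.sum * 5)) 5).foldl
        (fun acc i => acc ++ [pvChunk minerals i]) []) pvKey false).reverse).foldl pvStepA (picks, 0)).2
    = _
  rw [h1]
-- scalar mirror of the loop state: (picks[0], picks[1], picks[2], answer)
def pvQ3 (st : List Int × Int) : Int × Int × Int × Int :=
  (st.1.getD 0 0, st.1.getD 1 0, st.1.getD 2 0, st.2)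

def pvSA (q : Int × Int × Int × Int) (t : Int × Int × Int) : Int × Int × Int × Int :=
  if q.1 ≠ 0 then (q.1 - 1, q.2.1, q.2.2.1, q.2.2.2 + (t.1 + t.2.1 + t.2.2))
  else if q.2.1 ≠ 0 then (q.1, q.2.1 - 1, q.2.2.1, q.2.2.2 + (5 * t.1 + t.2.1 + t.2.2))
  else if q.2.2.1 ≠ 0 then (q.1, q.2.1, q.2.2.1 - 1, q.2.2.2 + (25 * t.1 + 5 * t.2.1 + t.2.2))
  else q

-- closed forms for bulk-assigning c identical chunks, one pick level at a time
-- (the guarded form 'if p < 0 then c else min p c' is A's behaviour on ANY pick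
-- values; under Pre_ it collapses to B's plain min — see pvBulkMin_eq_pvBulk)
def pvSBt2 (q : Int × Int × Int × Int) (t : Int × Int × Int) (c : Int) : Int × Int × Int × Int :=
  let t2 := if q.2.2.1 < 0 then c else min q.2.2.1 c
  (q.1, q.2.1, q.2.2.1 - t2, q.2.2.2 + t2 * (25 * t.1 + 5 * t.2.1 + t.2.2))
def pvSBt1 (q : Int × Int × Int × Int) (t : Int × Int × Int) (c : Int) : Int × Int × Int × Int :=
  let t1 := if q.2.1 < 0 then c else min q.2.1 c
  pvSBt2 (q.1, q.2.1 - t1, q.2.2.1, q.2.2.2 + t1 * (5 * t.1 + t.2.1 + t.2.2)) t (c - t1)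
def pvSBt0 (q : Int × Int × Int × Int) (t : Int × Int × Int) (c : Int) : Int × Int × Int × Int :=
  let t0 := if q.1 < 0 then c else min q.1 c
  pvSBt1 (q.1 - t0, q.2.1, q.2.2.1, q.2.2.2 + t0 * (t.1 + t.2.1 + t.2.2)) t (c - t0)

-- the guarded list-level bulk step (equal to c iterations of A's step, any picks)
def pvBulk (st : List Int × Int) (t : Int × Int × Int) (c : Int) : List Int × Int :=
  if c = 0 then st
  else
    let pk0 := st.1
    let answer := st.2
    let t0 := if pk0.getD 0 0 < 0 then c else min (pk0.getD 0 0) c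
    let pk1 := pk0.set 0 (pk0.getD 0 0 - t0)
    let a1 := answer + t0 * (t.1 + t.2.1 + t.2.2)
    let c1 := c - t0
    if c1 ≠ 0 then
      let t1 := if pk1.getD 1 0 < 0 then c1 else min (pk1.getD 1 0) c1
      let pk2 := pk1.set 1 (pk1.getD 1 0 - t1)
      let a2 := a1 + t1 * (5 * t.1 + t.2.1 + t.2.2)
      let c2 := c1 - t1
      if c2 ≠ 0 then
        let t2 := if pk2.getD 2 0 < 0 then c2 else min (pk2.getD 2 0) c2
        let pk3 := pk2.set 2 (pk2.getD 2 0 - t2)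
        let a3 := a2 + t2 * (25 * t.1 + 5 * t.2.1 + t.2.2)
        (pk3, a3)
      else (pk2, a2)
    else (pk1, a1)

-- the list-level bulk step of B's port (plain min), chunk triple and count abstracted
def pvBulkMin (st : List Int × Int) (t : Int × Int × Int) (c : Int) : List Int × Int :=
  if c = 0 then st
  else
    let pk0 := st.1
    let answer := st.2
    let t0 := min (pk0.getD 0 0) c
    let pk1 := pk0.set 0 (pk0.getD 0 0 - t0)
    let a1 := answer + t0 * (t.1 + t.2.1 + t.2.2)
    let c1 := c - t0
    if c1 ≠ 0 then
      let t1 := min (pk1.getD 1 0) c1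
      let pk2 := pk1.set 1 (pk1.getD 1 0 - t1)
      let a2 := a1 + t1 * (5 * t.1 + t.2.1 + t.2.2)
      let c2 := c1 - t1
      if c2 ≠ 0 then
        let t2 := min (pk2.getD 2 0) c2
        let pk3 := pk2.set 2 (pk2.getD 2 0 - t2)
        let a3 := a2 + t2 * (25 * t.1 + 5 * t.2.1 + t.2.2)
        (pk3, a3)
      else (pk2, a2)
    else (pk1, a1)

-- "n chunks remain and the picks the loop will still read are nonnegative"
def pvGQ (q : Int × Int × Int × Int) (n : Int) : Prop :=
  n ≤ 0 ∨ (0 ≤ q.1 ∧ (n ≤ q.1 ∨ (0 ≤ q.2.1 ∧ (n ≤ q.1 + q.2.1 ∨ 0 ≤ q.2.2.1))))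

-- getD/set bookkeeping (default 0, the value B's port reads where Python would raise)
lemma pvGetD_set_eq (l : List Int) (i : Nat) (v : Int) :
    (l.set i v).getD i 0 = if i < l.length then v else l.getD i 0 := by
  rw [List.getD_eq_getElem?_getD, List.getD_eq_getElem?_getD, List.getElem?_set]
  split_ifs with h1 h2 h2 <;> simp_all
lemma pvGetD_set_ne (l : List Int) (i j : Nat) (h : i ≠ j) (v : Int) :
    (l.set i v).getD j 0 = l.getD j 0 := by
  rw [List.getD_eq_getElem?_getD, List.getD_eq_getElem?_getD, List.getElem?_set, if_neg h]
lemma pvGetD_zero_of_ge (l : List Int) (i : Nat) (h : l.length ≤ i) : l.getD i 0 = 0 := by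
  rw [List.getD_eq_getElem?_getD, List.getElem?_eq_none h]
  rfl
lemma pvSetD_sub (l : List Int) (i : Nat) (g u : Int) (hg : l.getD i 0 = g) (hu : g = 0 → u = 0) :
    (l.set i (g - u)).getD i 0 = g - u := by
  rw [pvGetD_set_eq]
  split_ifs with h
  · rfl
  · have hz : l.getD i 0 = 0 := pvGetD_zero_of_ge l i (by omega)
    have hg0 : g = 0 := hg.symm.trans hz
    have hu0 := hu hg0
    omega

lemma pvSBt2_zero (q : Int × Int × Int × Int) (t : Int × Int × Int) : pvSBt2 q t 0 = q := by
  obtain ⟨p0, p1, p2, a⟩ := q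
  simp only [pvSBt2]
  by_cases h : p2 < 0
  · simp [h]
  · rw [if_neg h, show min p2 0 = 0 from by omega]
    simp
lemma pvSBt1_zero (q : Int × Int × Int × Int) (t : Int × Int × Int) : pvSBt1 q t 0 = q := by
  obtain ⟨p0, p1, p2, a⟩ := q
  simp only [pvSBt1]
  by_cases h : p1 < 0
  · simpa [h] using pvSBt2_zero (p0, p1, p2, a) t
  · rw [if_neg h, show min p1 0 = 0 from by omega]
    simpa using pvSBt2_zero (p0, p1, p2, a) t
lemma pvSBt0_zero (q : Int × Int × Int × Int) (t : Int × Int × Int) : pvSBt0 q t 0 = q := by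
  obtain ⟨p0, p1, p2, a⟩ := q
  simp only [pvSBt0]
  by_cases h : p0 < 0
  · simpa [h] using pvSBt1_zero (p0, p1, p2, a) t
  · rw [if_neg h, show min p0 0 = 0 from by omega]
    simpa using pvSBt1_zero (p0, p1, p2, a) t
-- dropping a zero first pick level
lemma pvSBt1_of_zero (q : Int × Int × Int × Int) (t : Int × Int × Int) (c : Int)
    (hq : q.2.1 = 0) (hc : 0 ≤ c) : pvSBt1 q t c = pvSBt2 q t c := by
  obtain ⟨p0, p1, p2, a⟩ := q
  simp only at hq
  subst hq
  simp only [pvSBt1]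
  rw [if_neg (by omega), show min (0:Int) c = 0 from by omega]
  simp
lemma pvSBt0_of_zero (q : Int × Int × Int × Int) (t : Int × Int × Int) (c : Int)
    (hq : q.1 = 0) (hc : 0 ≤ c) : pvSBt0 q t c = pvSBt1 q t c := by
  obtain ⟨p0, p1, p2, a⟩ := q
  simp only at hq
  subst hq
  simp only [pvSBt0]
  rw [if_neg (by omega), show min (0:Int) c = 0 from by omega]
  simp

-- each port's loop body acts on the scalar shadow of the state
lemma pvStepA_track (st : List Int × Int) (t : Int × Int × Int) :
    pvQ3 (pvStepA st t) = pvSA (pvQ3 st) t := by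
  obtain ⟨picks, a⟩ := st
  simp only [pvStepA, pvQ3, pvSA]
  by_cases h0 : picks.getD 0 0 ≠ 0
  · have hlen : 0 < picks.length := by
      by_contra hl
      exact h0 (pvGetD_zero_of_ge picks 0 (by omega))
    simp only [if_pos h0]
    rw [pvGetD_set_eq, if_pos hlen, pvGetD_set_ne _ 0 1 (by omega), pvGetD_set_ne _ 0 2 (by omega)]
  · by_cases h1 : picks.getD 1 0 ≠ 0
    · have hlen : 1 < picks.length := by
        by_contra hl
        exact h1 (pvGetD_zero_of_ge picks 1 (by omega))
      simp only [if_neg h0, if_pos h1]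
      rw [pvGetD_set_eq, if_pos hlen, pvGetD_set_ne _ 1 0 (by omega), pvGetD_set_ne _ 1 2 (by omega)]
    · by_cases h2 : picks.getD 2 0 ≠ 0
      · have hlen : 2 < picks.length := by
          by_contra hl
          exact h2 (pvGetD_zero_of_ge picks 2 (by omega))
        simp only [if_neg h0, if_neg h1, if_pos h2]
        rw [pvGetD_set_eq, if_pos hlen, pvGetD_set_ne _ 2 0 (by omega), pvGetD_set_ne _ 2 1 (by omega)]
      · simp only [if_neg h0, if_neg h1, if_neg h2]
lemma pvFoldA_track (L : List (Int × Int × Int)) (st : List Int × Int) :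
    pvQ3 (L.foldl pvStepA st) = L.foldl pvSA (pvQ3 st) := by
  induction L generalizing st with
  | nil => rfl
  | cons t L ih =>
    rw [List.foldl_cons, List.foldl_cons, ih, pvStepA_track]
lemma pvBulk_track (st : List Int × Int) (t : Int × Int × Int) (c : Int) (hc : 0 ≤ c) :
    pvQ3 (pvBulk st t c) = pvSBt0 (pvQ3 st) t c := by
  obtain ⟨picks, a⟩ := st
  by_cases hc0 : c = 0
  · subst hc0
    rw [show pvBulk (picks, a) t 0 = (picks, a) from by simp [pvBulk]]
    exact (pvSBt0_zero _ t).symm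
  · have hT0 : 0 ≤ (if picks.getD 0 0 < 0 then c else min (picks.getD 0 0) c) ∧ (if picks.getD 0 0 < 0 then c else min (picks.getD 0 0) c) ≤ c ∧ (picks.getD 0 0 = 0 → (if picks.getD 0 0 < 0 then c else min (picks.getD 0 0) c) = 0) := by
      split_ifs <;> omega
    obtain ⟨hT0a, hT0b, hT0c⟩ := hT0
    have hC1 : 0 ≤ (c - (if picks.getD 0 0 < 0 then c else min (picks.getD 0 0) c)) := by omega
    have hT1 : 0 ≤ (if picks.getD 1 0 < 0 then (c - (if picks.getD 0 0 < 0 then c else min (picks.getD 0 0) c)) else min (picks.getD 1 0) (c - (if picks.getD 0 0 < 0 then c else min (picks.getD 0 0) c))) ∧ (if picks.getD 1 0 < 0 then (c - (if picks.getD 0 0 < 0 then c else min (picks.getD 0 0) c)) else min (picks.getD 1 0) (c - (if picks.getD 0 0 < 0 then c else min (picks.getD 0 0) c))) ≤ (c - (if picks.getD 0 0 < 0 then c else min (picks.getD 0 0) c)) ∧ (picks.getD 1 0 = 0 → (if picks.getD 1 0 < 0 then (c - (if picks.getD 0 0 < 0 then c else min (picks.getD 0 0) c)) else min (picks.getD 1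 0) (c - (if picks.getD 0 0 < 0 then c else min (picks.getD 0 0) c))) = 0) := by
      split_ifs <;> omega
    obtain ⟨hT1a, hT1b, hT1c⟩ := hT1
    have hC2 : 0 ≤ ((c - (if picks.getD 0 0 < 0 then c else min (picks.getD 0 0) c)) - (if picks.getD 1 0 < 0 then (c - (if picks.getD 0 0 < 0 then c else min (picks.getD 0 0) c)) else min (picks.getD 1 0) (c - (if picks.getD 0 0 < 0 then c else min (picks.getD 0 0) c)))) := by omega
    have hT2 : 0 ≤ (if picks.getD 2 0 < 0 then ((c - (if picks.getD 0 0 < 0 then c else min (picks.getD 0 0) c)) - (if picks.getD 1 0 < 0 then (c - (if picks.getD 0 0 < 0 then c else min (picks.getD 0 0) c)) else min (picks.getD 1 0) (c - (if picks.getD 0 0 < 0 then c else min (picks.getD 0 0) c)))) else min (picks.getD 2 0) ((c - (if picks.getD 0 0 < 0 then c else min (picks.getD 0 0) c)) - (if picks.getD 1 0 < 0 then (c - (if picks.getD 0 0 < 0 then c else min (picks.getD 0 0) c)) else min (picks.getD 1 0) (c - (if picks.getD 0 0 < 0 then c else min (picks.getD 0 0) c))))) ∧ (if picks.getD 2 0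 < 0 then ((c - (if picks.getD 0 0 < 0 then c else min (picks.getD 0 0) c)) - (if picks.getD 1 0 < 0 then (c - (if picks.getD 0 0 < 0 then c else min (picks.getD 0 0) c)) else min (picks.getD 1 0) (c - (if picks.getD 0 0 < 0 then c else min (picks.getD 0 0) c)))) else min (picks.getD 2 0) ((c - (if picks.getD 0 0 < 0 then c else min (picks.getD 0 0) c)) - (if picks.getD 1 0 < 0 then (c - (if picks.getD 0 0 < 0 then c else min (picks.getD 0 0) c)) else min (picks.getD 1 0) (c - (if picks.getD 0 0 < 0 then c else min (picks.getD 0 0) c))))) ≤ ((c - (if picks.getD 0 0 < 0 then c else min (picks.getD 0 0) c)) - (if picks.getD 1 0 < 0 then (c - (if picks.getD 0 0 < 0 then c else min (picks.getD 0 0) c)) else min (picks.getD 1 0) (c - (if picks.getD 0 0 < 0 then c else min (picks.getD 0 0) c)))) ∧ (picks.getD 2 0 = 0 → (if picks.getD 2 0 < 0 then ((c - (if picks.getD 0 0 < 0 then c else min (picks.getD 0 0) c)) - (if picks.getD 1 0 < 0 then (c - (if picks.getD 0 0 < 0 then c else min (picks.getD 0 0) c)) else min (picks.getD 1 0) (c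 - (if picks.getD 0 0 < 0 then c else min (picks.getD 0 0) c)))) else min (picks.getD 2 0) ((c - (if picks.getD 0 0 < 0 then c else min (picks.getD 0 0) c)) - (if picks.getD 1 0 < 0 then (c - (if picks.getD 0 0 < 0 then c else min (picks.getD 0 0) c)) else min (picks.getD 1 0) (c - (if picks.getD 0 0 < 0 then c else min (picks.getD 0 0) c))))) = 0) := by
      split_ifs <;> omega
    obtain ⟨hT2a, hT2b, hT2c⟩ := hT2
    have hRHS : pvSBt0 (pvQ3 (picks, a)) t c
        = (picks.getD 0 0 - (if picks.getD 0 0 < 0 then c else min (picks.getD 0 0) c), picks.getD 1 0 - (if picks.getD 1 0 < 0 then (c - (if picks.getD 0 0 < 0 then c else min (picks.getD 0 0) c)) else min (picks.getD 1 0) (c - (if picks.getD 0 0 < 0 then c else min (picks.getD 0 0) c))), picks.getD 2 0 - (if picks.getD 2 0 < 0 then ((c - (if picks.getD 0 0 < 0 then c else min (picks.getD 0 0) c)) - (if picks.getD 1 0 < 0 then (c - (if picks.getD 0 0 < 0 then c else min (picks.getD 0 0) c)) else min (picks.getD 1 0) (c - (if picks.getD 0 0 < 0 then c else min (picks.getD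 0 0) c)))) else min (picks.getD 2 0) ((c - (if picks.getD 0 0 < 0 then c else min (picks.getD 0 0) c)) - (if picks.getD 1 0 < 0 then (c - (if picks.getD 0 0 < 0 then c else min (picks.getD 0 0) c)) else min (picks.getD 1 0) (c - (if picks.getD 0 0 < 0 then c else min (picks.getD 0 0) c))))), a + (if picks.getD 0 0 < 0 then c else min (picks.getD 0 0) c) * (t.1 + t.2.1 + t.2.2) + (if picks.getD 1 0 < 0 then (c - (if picks.getD 0 0 < 0 then c else min (picks.getD 0 0) c)) else min (picks.getD 1 0) (c - (if picks.getD 0 0 < 0 then c else min (picks.getD 0 0) c))) * (5 * t.1 + t.2.1 + t.2.2) + (if picks.getD 2 0 < 0 then ((c - (if picks.getD 0 0 < 0 then c else min (picks.getD 0 0) c)) - (if picks.getD 1 0 < 0 then (c - (if picks.getD 0 0 < 0 then c else min (picks.getD 0 0) c)) else min (picks.getD 1 0) (c - (if picks.getD 0 0 < 0 then c else min (picks.getD 0 0) c)))) else min (picks.getD 2 0) ((c - (if picks.getD 0 0 < 0 then c else min (picks.getD 0 0) c)) - (if picks.getD 1 0 < 0 then (c - (if picks.getD 0 0 < 0 then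 c else min (picks.getD 0 0) c)) else min (picks.getD 1 0) (c - (if picks.getD 0 0 < 0 then c else min (picks.getD 0 0) c))))) * (25 * t.1 + 5 * t.2.1 + t.2.2)) := by
      simp only [pvQ3, pvSBt0, pvSBt1, pvSBt2]
    have hLHS : pvQ3 (pvBulk (picks, a) t c)
        = if (c - (if picks.getD 0 0 < 0 then c else min (picks.getD 0 0) c)) ≠ 0 then
            (if ((c - (if picks.getD 0 0 < 0 then c else min (picks.getD 0 0) c)) - (if picks.getD 1 0 < 0 then (c - (if picks.getD 0 0 < 0 then c else min (picks.getD 0 0) c)) else min (picks.getD 1 0) (c - (if picks.getD 0 0 < 0 then c else min (picks.getD 0 0) c)))) ≠ 0 then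
              (picks.getD 0 0 - (if picks.getD 0 0 < 0 then c else min (picks.getD 0 0) c), picks.getD 1 0 - (if picks.getD 1 0 < 0 then (c - (if picks.getD 0 0 < 0 then c else min (picks.getD 0 0) c)) else min (picks.getD 1 0) (c - (if picks.getD 0 0 < 0 then c else min (picks.getD 0 0) c))), picks.getD 2 0 - (if picks.getD 2 0 < 0 then ((c - (if picks.getD 0 0 < 0 then c else min (picks.getD 0 0) c)) - (if picks.getD 1 0 < 0 then (c - (if picks.getD 0 0 < 0 then c else min (picks.getD 0 0) c)) else min (picks.getD 1 0) (c - (if picks.getD 0 0 < 0 then c else min (picks.getD 0 0) c)))) else min (picks.getD 2 0) ((c - (if picks.getD 0 0 < 0 then c else min (picks.getD 0 0) c)) - (if picks.getD 1 0 < 0 then (c - (if picks.getD 0 0 < 0 then c else min (picks.getD 0 0) c)) else min (picks.getD 1 0) (c - (if picks.getD 0 0 < 0 then c else min (picks.getD 0 0) c))))), a + (if picks.getD 0 0 < 0 then c else min (picks.getD 0 0) c) * (t.1 + t.2.1 + t.2.2) + (if picks.getD 1 0 < 0 then (c - (if picks.getD 0 0 < 0 then c else min (picks.getD 0 0) c))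 else min (picks.getD 1 0) (c - (if picks.getD 0 0 < 0 then c else min (picks.getD 0 0) c))) * (5 * t.1 + t.2.1 + t.2.2) + (if picks.getD 2 0 < 0 then ((c - (if picks.getD 0 0 < 0 then c else min (picks.getD 0 0) c)) - (if picks.getD 1 0 < 0 then (c - (if picks.getD 0 0 < 0 then c else min (picks.getD 0 0) c)) else min (picks.getD 1 0) (c - (if picks.getD 0 0 < 0 then c else min (picks.getD 0 0) c)))) else min (picks.getD 2 0) ((c - (if picks.getD 0 0 < 0 then c else min (picks.getD 0 0) c)) - (if picks.getD 1 0 < 0 then (c - (if picks.getD 0 0 < 0 then c else min (picks.getD 0 0) c)) else min (picks.getD 1 0) (c - (if picks.getD 0 0 < 0 then c else min (picks.getD 0 0) c))))) * (25 * t.1 + 5 * t.2.1 + t.2.2))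
             else (picks.getD 0 0 - (if picks.getD 0 0 < 0 then c else min (picks.getD 0 0) c), picks.getD 1 0 - (if picks.getD 1 0 < 0 then (c - (if picks.getD 0 0 < 0 then c else min (picks.getD 0 0) c)) else min (picks.getD 1 0) (c - (if picks.getD 0 0 < 0 then c else min (picks.getD 0 0) c))), picks.getD 2 0, a + (if picks.getD 0 0 < 0 then c else min (picks.getD 0 0) c) * (t.1 + t.2.1 + t.2.2) + (if picks.getD 1 0 < 0 then (c - (if picks.getD 0 0 < 0 then c else min (picks.getD 0 0) c)) else min (picks.getD 1 0) (c - (if picks.getD 0 0 < 0 then c else min (picks.getD 0 0) c))) * (5 * t.1 + t.2.1 + t.2.2)))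
          else (picks.getD 0 0 - (if picks.getD 0 0 < 0 then c else min (picks.getD 0 0) c), picks.getD 1 0, picks.getD 2 0, a + (if picks.getD 0 0 < 0 then c else min (picks.getD 0 0) c) * (t.1 + t.2.1 + t.2.2)) := by
      simp only [pvBulk, if_neg hc0]
      simp only [apply_ite (f := pvQ3)]
      simp only [pvQ3]
      rw [pvGetD_set_ne picks 0 1 (by omega)]
      rw [pvGetD_set_ne _ 1 2 (by omega)]
      rw [pvGetD_set_ne picks 0 2 (by omega)]
      rw [pvGetD_set_ne _ 2 0 (by omega)]
      rw [pvGetD_set_ne _ 1 0 (by omega)]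
      rw [pvSetD_sub picks 0 (picks.getD 0 0) _ rfl hT0c]
      rw [pvGetD_set_ne _ 2 1 (by omega)]
      rw [pvSetD_sub (picks.set 0 (picks.getD 0 0 - (if picks.getD 0 0 < 0 then c else min (picks.getD 0 0) c))) 1 (picks.getD 1 0) _
            (pvGetD_set_ne picks 0 1 (by omega) _) hT1c]
      rw [pvSetD_sub ((picks.set 0 (picks.getD 0 0 - (if picks.getD 0 0 < 0 then c else min (picks.getD 0 0) c))).set 1 (picks.getD 1 0 - (if picks.getD 1 0 < 0 then (c - (if picks.getD 0 0 < 0 then c else min (picks.getD 0 0) c)) else min (picks.getD 1 0) (c - (if picks.getD 0 0 < 0 then c else min (picks.getD 0 0) c))))) 2 (picks.getD 2 0) _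
            (by rw [pvGetD_set_ne _ 1 2 (by omega), pvGetD_set_ne picks 0 2 (by omega)]) hT2c]
    rw [hLHS, hRHS]
    by_cases h1 : (c - (if picks.getD 0 0 < 0 then c else min (picks.getD 0 0) c)) ≠ 0
    · rw [if_pos h1]
      by_cases h2 : ((c - (if picks.getD 0 0 < 0 then c else min (picks.getD 0 0) c)) - (if picks.getD 1 0 < 0 then (c - (if picks.getD 0 0 < 0 then c else min (picks.getD 0 0) c)) else min (picks.getD 1 0) (c - (if picks.getD 0 0 < 0 then c else min (picks.getD 0 0) c)))) ≠ 0
      · rw [if_pos h2]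
      · rw [if_neg h2]
        have hC2z : ((c - (if picks.getD 0 0 < 0 then c else min (picks.getD 0 0) c)) - (if picks.getD 1 0 < 0 then (c - (if picks.getD 0 0 < 0 then c else min (picks.getD 0 0) c)) else min (picks.getD 1 0) (c - (if picks.getD 0 0 < 0 then c else min (picks.getD 0 0) c)))) = 0 := by omega
        have hz2 : (if picks.getD 2 0 < 0 then ((c - (if picks.getD 0 0 < 0 then c else min (picks.getD 0 0) c)) - (if picks.getD 1 0 < 0 then (c - (if picks.getD 0 0 < 0 then c else min (picks.getD 0 0) c)) else min (picks.getD 1 0) (c - (if picks.getD 0 0 < 0 then c else min (picks.getD 0 0) c)))) else min (picks.getD 2 0) ((c - (if picks.getD 0 0 < 0 then c else min (picks.getD 0 0) c)) - (if picks.getD 1 0 < 0 then (c - (if picks.getD 0 0 < 0 then c else min (picks.getD 0 0) c)) else min (picks.getD 1 0) (c - (if picks.getD 0 0 < 0 then c else min (picks.getD 0 0) c))))) = 0 := by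
          rw [hC2z]
          split_ifs <;> omega
        rw [hz2]
        simp
    · rw [if_neg h1]
      have hC1z : (c - (if picks.getD 0 0 < 0 then c else min (picks.getD 0 0) c)) = 0 := by omega
      have hz1 : (if picks.getD 1 0 < 0 then (c - (if picks.getD 0 0 < 0 then c else min (picks.getD 0 0) c)) else min (picks.getD 1 0) (c - (if picks.getD 0 0 < 0 then c else min (picks.getD 0 0) c))) = 0 := by
        rw [hC1z]
        split_ifs <;> omega
      have hz2 : (if picks.getD 2 0 < 0 then ((c - (if picks.getD 0 0 < 0 then c else min (picks.getD 0 0) c)) - (if picks.getD 1 0 < 0 then (c - (if picks.getD 0 0 < 0 then c else min (picks.getD 0 0) c)) else min (picks.getD 1 0) (c - (if picks.getD 0 0 < 0 then c else min (picks.getD 0 0) c)))) else min (picks.getD 2 0) ((c - (if picks.getD 0 0 < 0 then c else min (picks.getD 0 0) c)) - (if picks.getD 1 0 < 0 then (c - (if picks.getD 0 0 < 0 then c else min (picks.getD 0 0) c)) else min (picks.getD 1 0) (c - (if picks.getD 0 0 < 0 then c else min (picks.getD 0 0) c))))) = 0 := by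
        rw [hz1, hC1z]
        split_ifs <;> omega
      rw [hz2, hz1]
      simp

lemma pvFoldB_track (K : List Int) (f : Int → Int) (hf : ∀ k ∈ K, 0 ≤ f k) (st : List Int × Int) :
    pvQ3 (K.foldl (fun st k => pvBulk st (pvDec k) (f k)) st)
      = K.foldl (fun q k => pvSBt0 q (pvDec k) (f k)) (pvQ3 st) := by
  induction K generalizing st with
  | nil => rfl
  | cons k K ih =>
    rw [List.foldl_cons, List.foldl_cons, ih (fun j hj => hf j (by simp [hj])),
        pvBulk_track _ _ _ (hf k (by simp))]

-- bulk-assigning c identical chunks is iterating the per-chunk step c times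
lemma pvIterL2 (t : Int × Int × Int) (c : Nat) (q : Int × Int × Int × Int)
    (h0 : q.1 = 0) (h1 : q.2.1 = 0) :
    (List.replicate c t).foldl pvSA q = pvSBt2 q t (c : Int) := by
  induction c generalizing q with
  | zero =>
    simpa using (pvSBt2_zero q t).symm
  | succ c ih =>
    obtain ⟨p0, p1, p2, a⟩ := q
    simp only at h0 h1
    subst h0 h1
    rw [List.replicate_succ, List.foldl_cons]
    by_cases h2 : p2 ≠ 0
    · have hsa : pvSA (0, 0, p2, a) t = (0, 0, p2 - 1, a + (25 * t.1 + 5 * t.2.1 + t.2.2)) := by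
        simp [pvSA, h2]
      rw [hsa, ih _ rfl rfl]
      simp only [pvSBt2]
      by_cases hneg : p2 < 0
      · rw [if_pos (by omega : p2 - 1 < 0), if_pos hneg]
        refine Prod.ext rfl (Prod.ext rfl (Prod.ext ?_ ?_)) <;> push_cast <;> ring
      · rw [if_neg (by omega : ¬ p2 - 1 < 0), if_neg hneg]
        have hm : min (p2 - 1) (c : Int) + 1 = min p2 ((c : Int) + 1) := by omega
        refine Prod.ext rfl (Prod.ext rfl (Prod.ext ?_ ?_))
        · push_cast
          omega
        · push_cast
          rw [← hm]
          ring
    · have hsa : pvSA (0, 0, p2, a) t = (0, 0, p2, a) := by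
        simp [pvSA, h2]
      rw [hsa, ih _ rfl rfl]
      simp only [pvSBt2]
      have hp2 : p2 = 0 := by omega
      subst hp2
      rw [if_neg (by omega), if_neg (by omega), show min (0:Int) (c:Int) = 0 from by omega]
      push_cast
      rw [show min (0:Int) ((c:Int)+1) = 0 from by omega]
      simp
lemma pvIterL1 (t : Int × Int × Int) (c : Nat) (q : Int × Int × Int × Int) (h0 : q.1 = 0) :
    (List.replicate c t).foldl pvSA q = pvSBt1 q t (c : Int) := by
  induction c generalizing q with
  | zero =>
    simpa using (pvSBt1_zero q t).symm
  | succ c ih =>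
    obtain ⟨p0, p1, p2, a⟩ := q
    simp only at h0
    subst h0
    by_cases h1 : p1 = 0
    · rw [pvSBt1_of_zero _ t _ (by simpa using h1) (by positivity)]
      exact pvIterL2 t (c + 1) _ rfl (by simpa using h1)
    · rw [List.replicate_succ, List.foldl_cons]
      have hsa : pvSA (0, p1, p2, a) t = (0, p1 - 1, p2, a + (5 * t.1 + t.2.1 + t.2.2)) := by
        simp [pvSA, h1]
      rw [hsa, ih _ rfl]
      simp only [pvSBt1]
      by_cases hneg : p1 < 0
      · rw [if_pos (by omega : p1 - 1 < 0), if_pos hneg]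
        have e2 : (c : Int) - (c : Int) = ((c : Int) + 1) - ((c : Int) + 1) := by ring
        have e1 : ((0 : Int), p1 - 1 - (c : Int), p2, a + (5 * t.1 + t.2.1 + t.2.2) + (c : Int) * (5 * t.1 + t.2.1 + t.2.2))
            = ((0 : Int), p1 - ((c : Int) + 1), p2, a + ((c : Int) + 1) * (5 * t.1 + t.2.1 + t.2.2)) := by
          refine Prod.ext rfl (Prod.ext ?_ (Prod.ext rfl ?_)) <;> (dsimp only; ring)
        push_cast
        rw [e1, e2]
      · rw [if_neg (by omega : ¬ p1 - 1 < 0), if_neg hneg]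
        have hm : min (p1 - 1) (c : Int) + 1 = min p1 ((c : Int) + 1) := by omega
        have e1 : ((0 : Int), p1 - 1 - min (p1 - 1) (c : Int), p2, a + (5 * t.1 + t.2.1 + t.2.2) + min (p1 - 1) (c : Int) * (5 * t.1 + t.2.1 + t.2.2))
            = ((0 : Int), p1 - min p1 ((c : Int) + 1), p2, a + min p1 ((c : Int) + 1) * (5 * t.1 + t.2.1 + t.2.2)) := by
          refine Prod.ext rfl (Prod.ext ?_ (Prod.ext rfl ?_))
          · dsimp only
            omega
          · dsimp only
            rw [← hm]
            ring
        have e2 : (c : Int) - min (p1 - 1) (c : Int) = ((c : Int) + 1) - min p1 ((c : Int) + 1) := by omega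
        push_cast
        rw [e1, e2]
lemma pvIterL0 (t : Int × Int × Int) (c : Nat) (q : Int × Int × Int × Int) :
    (List.replicate c t).foldl pvSA q = pvSBt0 q t (c : Int) := by
  induction c generalizing q with
  | zero =>
    simpa using (pvSBt0_zero q t).symm
  | succ c ih =>
    obtain ⟨p0, p1, p2, a⟩ := q
    by_cases h0 : p0 = 0
    · rw [pvSBt0_of_zero _ t _ (by simpa using h0) (by positivity)]
      exact pvIterL1 t (c + 1) _ (by simpa using h0)
    · rw [List.replicate_succ, List.foldl_cons]
      have hsa : pvSA (p0, p1, p2, a) t = (p0 - 1, p1, p2, a + (t.1 + t.2.1 + t.2.2)) := by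
        simp [pvSA, h0]
      rw [hsa, ih _]
      simp only [pvSBt0]
      by_cases hneg : p0 < 0
      · rw [if_pos (by omega : p0 - 1 < 0), if_pos hneg]
        have e2 : (c : Int) - (c : Int) = ((c : Int) + 1) - ((c : Int) + 1) := by ring
        have e1 : (p0 - 1 - (c : Int), p1, p2, a + (t.1 + t.2.1 + t.2.2) + (c : Int) * (t.1 + t.2.1 + t.2.2))
            = (p0 - ((c : Int) + 1), p1, p2, a + ((c : Int) + 1) * (t.1 + t.2.1 + t.2.2)) := by
          refine Prod.ext ?_ (Prod.ext rfl (Prod.ext rfl ?_)) <;> (dsimp only; ring)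
        push_cast
        rw [e1, e2]
      · rw [if_neg (by omega : ¬ p0 - 1 < 0), if_neg hneg]
        have hm : min (p0 - 1) (c : Int) + 1 = min p0 ((c : Int) + 1) := by omega
        have e1 : (p0 - 1 - min (p0 - 1) (c : Int), p1, p2, a + (t.1 + t.2.1 + t.2.2) + min (p0 - 1) (c : Int) * (t.1 + t.2.1 + t.2.2))
            = (p0 - min p0 ((c : Int) + 1), p1, p2, a + min p0 ((c : Int) + 1) * (t.1 + t.2.1 + t.2.2)) := by
          refine Prod.ext ?_ (Prod.ext rfl (Prod.ext rfl ?_))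
          · dsimp only
            omega
          · dsimp only
            rw [← hm]
            ring
        have e2 : (c : Int) - min (p0 - 1) (c : Int) = ((c : Int) + 1) - min p0 ((c : Int) + 1) := by omega
        push_cast
        rw [e1, e2]

-- under the invariant pvGQ, B's plain-min bulk step IS the guarded bulk step
lemma pvBulkMin_eq_pvBulk (st : List Int × Int) (t : Int × Int × Int) (c n : Int)
    (hgq : pvGQ (pvQ3 st) n) (hc : 0 ≤ c) (hcn : c ≤ n) :
    pvBulkMin st t c = pvBulk st t c := by
  obtain ⟨picks, a⟩ := st
  simp only [pvGQ, pvQ3] at hgq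
  by_cases hc0 : c = 0
  · simp [pvBulkMin, pvBulk, hc0]
  · have hp0 : 0 ≤ picks.getD 0 0 := by omega
    simp only [pvBulkMin, pvBulk, if_neg hc0]
    rw [if_neg (not_lt.mpr hp0)]
    by_cases hc1 : c - min (picks.getD 0 0) c = 0
    · rw [if_neg (not_not_intro hc1), if_neg (not_not_intro hc1)]
    · have hlt0 : picks.getD 0 0 < c := by omega
      have hp1 : 0 ≤ picks.getD 1 0 := by omega
      rw [if_pos hc1, if_pos hc1]
      rw [pvGetD_set_ne picks 0 1 (by omega)]
      rw [if_neg (not_lt.mpr hp1)]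
      by_cases hc2 : c - min (picks.getD 0 0) c - min (picks.getD 1 0) (c - min (picks.getD 0 0) c) = 0
      · rw [if_neg (not_not_intro hc2), if_neg (not_not_intro hc2)]
      · have hlt1 : picks.getD 1 0 < c - min (picks.getD 0 0) c := by omega
        have hp2 : 0 ≤ picks.getD 2 0 := by omega
        rw [if_pos hc2, if_pos hc2]
        rw [pvGetD_set_ne _ 1 2 (by omega), pvGetD_set_ne picks 0 2 (by omega)]
        rw [if_neg (not_lt.mpr hp2)]

-- the invariant survives one guarded bulk step
lemma pvGQ_step (q : Int × Int × Int × Int) (t : Int × Int × Int) (c n : Int)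
    (hgq : pvGQ q n) (hc : 0 ≤ c) (_hcn : c ≤ n) : pvGQ (pvSBt0 q t c) (n - c) := by
  obtain ⟨p0, p1, p2, a⟩ := q
  simp only [pvGQ] at hgq ⊢
  simp only [pvSBt0, pvSBt1, pvSBt2]
  split_ifs <;> omega

-- the two bucket folds agree as long as at most n chunks are distributed
lemma pvFoldMin_eq (f : Int → Int) (K : List Int) (st : List Int × Int) (n : Int)
    (hgq : pvGQ (pvQ3 st) n) (hf : ∀ k ∈ K, 0 ≤ f k) (hsum : (K.map f).sum ≤ n) :
    K.foldl (fun st k => pvBulkMin st (pvDec k) (f k)) st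
      = K.foldl (fun st k => pvBulk st (pvDec k) (f k)) st := by
  induction K generalizing st n with
  | nil => rfl
  | cons k K ih =>
    have hfk : 0 ≤ f k := hf k (by simp)
    have htail : 0 ≤ (K.map f).sum := List.sum_nonneg (by
      intro x hx
      rw [List.mem_map] at hx
      obtain ⟨j, hj, rfl⟩ := hx
      exact hf j (by simp [hj]))
    have hsum' : f k + (K.map f).sum ≤ n := by simpa [List.map_cons, List.sum_cons] using hsum
    have hkn : f k ≤ n := by omega
    rw [List.foldl_cons, List.foldl_cons, pvBulkMin_eq_pvBulk st (pvDec k) (f k) n hgq hfk hkn]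
    have hgq' : pvGQ (pvQ3 (pvBulk st (pvDec k) (f k))) (n - f k) := by
      rw [pvBulk_track st (pvDec k) (f k) hfk]
      exact pvGQ_step (pvQ3 st) (pvDec k) (f k) n hgq hfk hkn
    exact ih _ (n - f k) hgq' (fun j hj => hf j (by simp [hj])) (by omega)

-- the bucket counts add up to the number of chunks
lemma pvSum_counts (picks : List Int) (minerals : List String) :
    ((pvKdesc.map (fun k => ((pvCnt picks minerals k : Nat) : Int))).sum)
      = ((pvChunks picks minerals).length : Int) := by
  have hperm := (pvTripSeq_perm picks minerals).length_eq
  have hlen : (pvTripSeq picks minerals).length = (pvKdesc.map (fun k => pvCnt picks minerals k)).sum := by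
    simp [pvTripSeq, List.length_flatMap]
  have : ((pvKdesc.map (fun k => pvCnt picks minerals k)).sum : Int)
      = ((pvChunks picks minerals).length : Int) := by
    rw [← hlen, hperm]
  rw [← this, Nat.cast_list_sum, List.map_map]
  rfl

-- the number of chunks is Pre_'s k
lemma pvChunks_length (picks : List Int) (minerals : List String) :
    ((pvChunks picks minerals).length : Int)
      = (let m := min ((minerals.length : Int)) (picks.sum * 5);
         if m ≤ 0 then 0 else PySem.Int.floordiv (m + 4) 5) := by
  simp only [pvChunks, List.length_map]
  rw [PySem.List.pyRange_of_pos 0 (min ((minerals.length : Int)) (picks.sum * 5)) (by omega : (0:Int) < 5)]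
  simp only [List.length_map, List.length_range]
  by_cases hm : min ((minerals.length : Int)) (picks.sum * 5) ≤ 0
  · rw [if_neg (by omega), if_pos hm]
    simp
  · rw [if_pos (by omega), if_neg hm]
    rw [PySem.Int.floordiv_eq_ediv_of_pos (by omega : (0:Int) < 5)]
    have h5 : (0:Int) ≤ (min ((minerals.length : Int)) (picks.sum * 5) - 0 + 5 - 1) / 5 := by
      apply Int.ediv_nonneg <;> omega
    rw [Int.toNat_of_nonneg h5]
    congr 1
    omega

-- Pre_ gives the invariant at the start of B's bucket loop
lemma pvPre_GQ (picks : List Int) (minerals : List String) (hpre : Pre_solution picks minerals) :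
    pvGQ (pvQ3 (picks, 0)) ((pvChunks picks minerals).length : Int) := by
  have hlen := pvChunks_length picks minerals
  simp only [Pre_solution] at hpre
  simp only [pvGQ, pvQ3]
  simp only [] at hlen
  rw [hlen]
  omega

-- B's port, rewritten as the plain-min bucket fold over the counts
lemma pvSolutionBmin_eq (picks : List Int) (minerals : List String) :
    solution_alt picks minerals
      = ((pvKdesc.foldl
          (fun (st : List Int × Int) (k : Int) => pvBulkMin st (pvDec k) ((pvCnt picks minerals k : Nat) : Int))
          (picks, 0)).2) := by
  have hbuck : (PySem.List.pyRange 0 (min (minerals.length : Int) (picks.sum * 5)) 5).foldl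
      (fun b i => b.set (pvEnc (pvChunk minerals i)).toNat
        (PySem.List.pyGetD b (pvEnc (pvChunk minerals i)) 0 + 1)) (List.replicate 216 (0:Int))
      = (pvChunks picks minerals).foldl
        (fun b t => b.set (pvEnc t).toNat (PySem.List.pyGetD b (pvEnc t) 0 + 1))
        (List.replicate 216 (0:Int)) := by
    rw [pvChunks, List.foldl_map]
  have hcnt : ∀ k ∈ pvKdesc,
      PySem.List.pyGetD
        ((PySem.List.pyRange 0 (min (minerals.length : Int) (picks.sum * 5)) 5).foldl
              (fun b i => b.set (pvEnc (pvChunk minerals i)).toNat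
                (PySem.List.pyGetD b (pvEnc (pvChunk minerals i)) 0 + 1)) (List.replicate 216 (0:Int)))
        k 0 = ((pvCnt picks minerals k : Nat) : Int) := by
    intro k hk
    obtain ⟨h0, h1⟩ := (pvKdesc_mem k).mp hk
    rw [hbuck, pvBuckets_spec _ (pvBnd_chunks picks minerals) _ (List.length_replicate) k h0 h1]
    rw [PySem.List.pyGetD_eq_getElem _ _ h0 (by rw [List.length_replicate]; exact_mod_cast h1),
        List.getElem_replicate]
    simp [pvCnt]
  show ((pvKdesc.foldl
      (fun (st : List Int × Int) (key : Int) =>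
        pvBulkMin st (pvDec key)
          (PySem.List.pyGetD
            ((PySem.List.pyRange 0 (min (minerals.length : Int) (picks.sum * 5)) 5).foldl
              (fun b i => b.set (pvEnc (pvChunk minerals i)).toNat
                (PySem.List.pyGetD b (pvEnc (pvChunk minerals i)) 0 + 1)) (List.replicate 216 (0:Int)))
            key 0))
      (picks, 0)).2) = _
  rw [PySem.List.foldl_congr_mem pvKdesc _
    (fun (st : List Int × Int) (k : Int) => pvBulkMin st (pvDec k) ((pvCnt picks minerals k : Nat) : Int))
    (picks, 0)
    (by
      intro st k hk
      rw [hcnt k hk])]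

-- the guarded bucket fold is A's chunk-by-chunk fold over the replicate sequence
lemma pvGuardFold_eq (picks : List Int) (minerals : List String) :
    ((pvKdesc.foldl
        (fun (st : List Int × Int) (k : Int) => pvBulk st (pvDec k) ((pvCnt picks minerals k : Nat) : Int))
        (picks, 0)).2)
      = ((pvTripSeq picks minerals).foldl pvSA (pvQ3 (picks, 0))).2.2.2 := by
  rw [show ((pvKdesc.foldl
      (fun (st : List Int × Int) (k : Int) => pvBulk st (pvDec k) ((pvCnt picks minerals k : Nat) : Int))
      (picks, 0)).2)
    = ((pvQ3 (pvKdesc.foldl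
      (fun (st : List Int × Int) (k : Int) => pvBulk st (pvDec k) ((pvCnt picks minerals k : Nat) : Int))
      (picks, 0))).2.2.2) from rfl]
  rw [pvFoldB_track pvKdesc (fun k => ((pvCnt picks minerals k : Nat) : Int))
    (fun k _ => by positivity) (picks, 0)]
  rw [PySem.List.foldl_congr_mem pvKdesc _
    (fun (q : Int × Int × Int × Int) (k : Int) =>
      (List.replicate (pvCnt picks minerals k) (pvDec k)).foldl pvSA q)
    (pvQ3 (picks, 0))
    (by
      intro q k _
      exact (pvIterL0 (pvDec k) (pvCnt picks minerals k) q).symm)]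
  rw [← pvFoldl_flatMap (fun k => List.replicate (pvCnt picks minerals k) (pvDec k)) pvSA pvKdesc
    (pvQ3 (picks, 0))]
  rfl

theorem pvMain (picks : List Int) (minerals : List String) (hpre : Pre_solution picks minerals) :
    solution picks minerals = solution_alt picks minerals := by
  rw [pvSolutionA_eq, pvSorted_eq, List.reverse_reverse]
  rw [pvSolutionBmin_eq]
  rw [pvFoldMin_eq (fun k => ((pvCnt picks minerals k : Nat) : Int)) pvKdesc (picks, 0)
        ((pvChunks picks minerals).length : Int) (pvPre_GQ picks minerals hpre)
        (fun k _ => by positivity) (le_of_eq (pvSum_counts picks minerals))]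
  rw [pvGuardFold_eq]
  rw [show (((pvTripSeq picks minerals).foldl pvStepA (picks, 0)).2)
    = ((pvQ3 ((pvTripSeq picks minerals).foldl pvStepA (picks, 0))).2.2.2) from rfl]
  rw [pvFoldA_track]

-- ===== VERDICT (by name: the statement is the Claim_ definition above) =====
theorem solution_spec : Claim_equal_solution := by
  intro picks minerals _ hpre
  unfold Spec_solution
  exact pvMain picks minerals hpre
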